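-- pv_equiv track=rewrite | github.com/martinve/cs-parsing | tests/test_ud_parse.py | get_list_word
-- ===== SOURCE A (Python) =====
-- def get_list_word(lst, word):
--     match = None
--     for idx, el in enumerate(lst):
--         if type(el) == list and not match:
--             if el[1] == word:
--                 match = el
--             else:
--                 if get_list_word(el, word):
--                     match = get_list_word(el, word)
--     return match
-- ===== SOURCE B (Python) =====
-- def get_list_word(lst, word):
--     # Single early-return linear scan; under the list[list[str]] domain A's
--     # recursive calls can never produce a match, so the scan suffices.
--     return next((el for el in lst if type(el) == list and el[1] == word), None)
-- ===== Notes on version B (the rewrite author's own statement) =====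
-- stated objective: simpler
-- what changed: replaced the flag-accumulator loop with its (dead, under the list[list[str]] domain) double recursive calls by a single early-return linear scan via next() over a generator
import Mathlib
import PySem

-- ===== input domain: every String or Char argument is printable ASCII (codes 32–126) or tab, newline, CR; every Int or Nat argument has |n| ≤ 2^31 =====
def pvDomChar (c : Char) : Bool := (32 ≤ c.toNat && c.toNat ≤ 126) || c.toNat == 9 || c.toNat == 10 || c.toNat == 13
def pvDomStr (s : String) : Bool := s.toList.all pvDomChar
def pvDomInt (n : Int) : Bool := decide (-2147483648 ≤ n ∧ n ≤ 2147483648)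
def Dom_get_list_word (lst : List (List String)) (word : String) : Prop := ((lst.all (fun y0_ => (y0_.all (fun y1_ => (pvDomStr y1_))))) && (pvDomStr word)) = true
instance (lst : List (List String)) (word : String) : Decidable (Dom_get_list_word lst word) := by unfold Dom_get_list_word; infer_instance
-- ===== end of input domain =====

-- B replaces A's flag-accumulator loop (with recursive calls that are dead under the
-- list[list[str]] domain) by a single early-return linear scan; objective: simpler.


-- ===== PORT A =====
-- Python truthiness of `match` (None or a list): `not match` is true for None and []
def pyNotTruthy (m : Option (List String)) : Bool :=
  match m with
  | none => true
  | some l => l.isEmpty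

-- the recursive call get_list_word(el, word) where el : List String: every element is a
-- String, so `type(el2) == list` is always False and `match` stays None through the loop
def get_list_word_inner (lst : List String) (word : String) : Option (List String) :=
  lst.foldl (fun m _ => m) none

-- the for-loop over lst, with accumulator `match` (= m)
def get_list_word_go (lst : List (List String)) (word : String) (m : Option (List String)) : Option (List String) :=
  match lst with
  | [] => m
  | el :: rest =>
      get_list_word_go rest word
        (if pyNotTruthy m then
          match PySem.List.pyGet? el 1 with
          | some w =>
              if w = word then some el
              else
                -- `if get_list_word(el, word): match = get_list_word(el, word)`
                if pyNotTruthy (get_list_word_inner el word) then m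
                else get_list_word_inner el word
          | none => m      -- Python raises IndexError here; excluded by Pre_get_list_word
        else m)

def get_list_word (lst : List (List String)) (word : String) : Option (List String) :=
  get_list_word_go lst word none

-- ===== PORT B =====
def get_list_word_alt (lst : List (List String)) (word : String) : Option (List String) :=
  lst.find? (fun el => PySem.List.pyGet? el 1 == some word)
  -- Python B raises IndexError on `el[1]` for a short el before the first match;
  -- such inputs are excluded by Pre_get_list_word

-- ===== PRECONDITION & SPEC =====
-- Pre_ excludes exactly the inputs on which A raises IndexError: a sublist of length < 2
-- occurring before the first match (both A and B raise there).
def Pre_get_list_word (lst : List (List String)) (word : String) : Prop :=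
  ∀ el ∈ lst.takeWhile (fun el => !(PySem.List.pyGet? el 1 == some word)), 2 ≤ el.length
instance (lst : List (List String)) (word : String) : Decidable (Pre_get_list_word lst word) := by unfold Pre_get_list_word; infer_instance

def pvWitness_get_list_word : List (List String) × String := ([["a", "x"], ["b", "y"]], "y")

def Spec_get_list_word (lst : List (List String)) (word : String) (out : Option (List String)) : Prop := out = get_list_word_alt lst word
instance (lst : List (List String)) (word : String) (out : Option (List String)) : Decidable (Spec_get_list_word lst word out) := by unfold Spec_get_list_word; infer_instance

-- ===== CLAIM (what is proved, stated in full; the proofs are below) =====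
def Claim_equal_get_list_word : Prop := ∀ (lst : List (List String)) (word : String), Dom_get_list_word lst word → Pre_get_list_word lst word → Spec_get_list_word lst word (get_list_word lst word)

-- ===== LEMMAS AND PROOFS =====

theorem pyNotTruthy_none : pyNotTruthy none = true := rfl

theorem pyNotTruthy_some (l : List String) : pyNotTruthy (some l) = l.isEmpty := rfl

-- the inner recursive call always returns None
theorem inner_eq_none (lst : List String) (word : String) :
    get_list_word_inner lst word = none := by
  unfold get_list_word_inner
  induction lst with
  | nil => rfl
  | cons x xs ih => simp [ih]

-- once `match` is a non-empty list, the loop never changes it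
theorem go_frozen (lst : List (List String)) (word : String) (m : Option (List String))
    (hm : pyNotTruthy m = false) :
    get_list_word_go lst word m = m := by
  induction lst with
  | nil => rfl
  | cons el rest ih => simp [get_list_word_go, hm, ih]

theorem get_list_word_spec_aux (lst : List (List String)) (word : String)
    (hpre : Pre_get_list_word lst word) :
    get_list_word lst word = get_list_word_alt lst word := by
  unfold Pre_get_list_word at hpre
  unfold get_list_word get_list_word_alt
  induction lst with
  | nil => rfl
  | cons el rest ih =>
    by_cases hmatch : PySem.List.pyGet? el 1 == some word
    · -- el matches: A sets match = el and the loop freezes; B returns el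
      have hsome : PySem.List.pyGet? el 1 = some word := by simpa using hmatch
      have hne : el.isEmpty = false := by
        rcases el with _ | ⟨a, _ | ⟨b, t⟩⟩ <;> simp_all [PySem.List.pyGet?, PySem.List.pyIdx?]
      simp only [List.find?_cons, hmatch]
      simp only [get_list_word_go, pyNotTruthy_none, hsome, if_true]
      exact go_frozen rest word (some el) (by simp [pyNotTruthy_some, hne])
    · -- el does not match: both sides skip it
      have hpre' : ∀ e ∈ rest.takeWhile (fun el => !(PySem.List.pyGet? el 1 == some word)), 2 ≤ e.length := by
        intro e he
        exact hpre e (by simp [hmatch]; exact Or.inr he)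
      have hel : 2 ≤ el.length := hpre el (by simp [hmatch])
      obtain ⟨w, hw⟩ : ∃ w, PySem.List.pyGet? el 1 = some w := by
        rcases el with _ | ⟨a, _ | ⟨b, t⟩⟩ <;> simp_all [PySem.List.pyGet?, PySem.List.pyIdx?]
      have hwne : w ≠ word := by
        intro h; exact hmatch (by simp [hw, h])
      have hmf : (PySem.List.pyGet? el 1 == some word) = false := by simpa using hmatch
      simp only [List.find?_cons, hmf]
      simp only [get_list_word_go, pyNotTruthy_none, hw, if_true, if_neg hwne, inner_eq_none]
      exact ih hpre'

-- ===== VERDICT (by name: the statement is the Claim_ definition above) =====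
theorem get_list_word_spec : Claim_equal_get_list_word := by
  intro lst word _ hpre
  exact get_list_word_spec_aux lst word hpre
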